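-- pv_equiv track=rewrite | github.com/lanseria/zoom-earth-tile-download | src/zoom_earth_cli/utils.py | filter_timestamps_by_hours
-- ===== SOURCE A (Python) =====
-- from typing import Dict, List, Optional, Any
-- from typing import Dict, Set, Tuple
--
-- def filter_timestamps_by_hours(latest_times: Dict[str, List[int]], hours: int) -> Dict[str, List[int]]:
--     """Filters timestamps to keep only those within the last N hours."""
--     if hours <= 0:
--         # Return a copy to avoid modifying the original dict downstream
--         return {sat: list(ts_list) for sat, ts_list in latest_times.items()}
--
--     max_ts = 0
--     try:
--         # Find the overall latest timestamp across all non-empty lists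
--         all_ts = [ts for ts_list in latest_times.values() for ts in ts_list]
--         if not all_ts:
--              return {sat: [] for sat in latest_times} # No timestamps anywhere
--         max_ts = max(all_ts)
--     except ValueError:
--         # Handle case where latest_times might be empty or contain only empty lists
--          return {sat: [] for sat in latest_times}
--
--
--     cutoff_ts = max_ts - hours * 3600  # Calculate cutoff time
--
--     filtered_data = {}
--     for satellite, timestamps in latest_times.items():
--         # Keep timestamps greater than or equal to the cutoff
--         filtered_data[satellite] = sorted([ts for ts in timestamps if ts >= cutoff_ts])
--
--     return filtered_data
-- ===== SOURCE B (Python) =====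
-- def _bisect_left(a, x):
--     """First index i with a[i] >= x in the ascending-sorted list a (hand-rolled binary search)."""
--     lo, hi = 0, len(a)
--     while lo < hi:
--         mid = (lo + hi) // 2
--         if a[mid] < x:
--             lo = mid + 1
--         else:
--             hi = mid
--     return lo
--
--
-- def filter_timestamps_by_hours(latest_times, hours):
--     """Filters timestamps to keep only those within the last N hours."""
--     if hours <= 0:
--         return {sat: list(ts_list) for sat, ts_list in latest_times.items()}
--     # Sort each satellite's list once; the global max is the max of the last elements.
--     sorted_lists = {sat: sorted(ts_list) for sat, ts_list in latest_times.items()}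
--     tails = [ts[-1] for ts in sorted_lists.values() if ts]
--     if not tails:
--         return {sat: [] for sat in latest_times}
--     cutoff_ts = max(tails) - hours * 3600
--     # Each list is already sorted: binary-search the cutoff and slice.
--     return {sat: ts[_bisect_left(ts, cutoff_ts):] for sat, ts in sorted_lists.items()}
-- ===== Notes on version B (the rewrite author's own statement) =====
-- stated objective: alternative
-- what changed: Instead of filtering each list against a cutoff derived from a max over the flattened values and then sorting the filtered remainder, B sorts each list once, takes the global max as the max of the last elements of the non-empty sorted lists, and obtains each filtered result by binary-searching (hand-rolled bisect_left) the cutoff in the sorted list and slicing from there.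
import Mathlib
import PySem

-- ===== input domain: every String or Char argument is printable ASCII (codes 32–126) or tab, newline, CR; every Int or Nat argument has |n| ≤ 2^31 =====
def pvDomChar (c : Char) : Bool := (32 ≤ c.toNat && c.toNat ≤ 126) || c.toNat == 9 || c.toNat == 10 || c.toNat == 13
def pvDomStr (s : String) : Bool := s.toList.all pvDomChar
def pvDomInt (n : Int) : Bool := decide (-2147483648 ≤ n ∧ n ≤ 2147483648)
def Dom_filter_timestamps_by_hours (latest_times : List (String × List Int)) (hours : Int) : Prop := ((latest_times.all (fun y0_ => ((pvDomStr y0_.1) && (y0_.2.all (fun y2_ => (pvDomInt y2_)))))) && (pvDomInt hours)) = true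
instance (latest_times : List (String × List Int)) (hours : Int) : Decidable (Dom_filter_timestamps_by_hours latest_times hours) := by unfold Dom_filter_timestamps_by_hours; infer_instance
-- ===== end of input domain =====

-- B sorts each list once, derives the global max from the last elements of the non-empty
-- sorted lists, and slices each sorted list at a hand-rolled binary search of the cutoff
-- (alternative algorithm, same exact return value).

-- ===== PORT A =====
-- literal transliteration of A: flatten all values, take their max, then per satellite
-- filter by the cutoff and sort the survivors
def filter_timestamps_by_hours (latest_times : List (String × List Int)) (hours : Int) : List (String × List Int) :=
  if hours ≤ 0 then
    latest_times.map (fun p => (p.1, p.2))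
  else
    let all_ts : List Int := latest_times.flatMap (fun p => p.2)
    if all_ts.isEmpty then
      latest_times.map (fun p => (p.1, ([] : List Int)))
    else
      let max_ts := (PySem.List.max? all_ts (fun x => x)).getD 0   -- all_ts nonempty: max(all_ts) is exactly this
      let cutoff_ts := max_ts - hours * 3600
      latest_times.map (fun p =>
        (p.1, PySem.List.sorted (p.2.filter (fun ts => cutoff_ts ≤ ts)) (fun x => x) false))

-- ===== PORT B =====
-- hand-written binary search from Source B, step for step; a.getD mid 0 is Python's a[mid],
-- exact here because mid < hi ≤ len(a) on every call
def pvBisectLoop (a : List Int) (x : Int) : Nat → Nat → Nat → Nat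
  | 0, lo, _ => lo
  | fuel + 1, lo, hi =>
    if lo < hi then
      let mid := (lo + hi) / 2
      if a.getD mid 0 < x then pvBisectLoop a x fuel (mid + 1) hi
      else pvBisectLoop a x fuel lo mid
    else lo

-- the while loop runs at most hi - lo times; the fuel only makes the recursion structural
def pvBisectLeft (a : List Int) (x : Int) (lo hi : Nat) : Nat :=
  pvBisectLoop a x (hi - lo) lo hi

def filter_timestamps_by_hours_alt (latest_times : List (String × List Int)) (hours : Int) : List (String × List Int) :=
  if hours ≤ 0 then
    latest_times.map (fun p => (p.1, p.2))
  else
    let sorted_lists := latest_times.map (fun p => (p.1, PySem.List.sorted p.2 (fun x => x) false))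
    let tails := (sorted_lists.filter (fun p => !p.2.isEmpty)).map
      (fun p => (PySem.List.pyGet? p.2 (-1)).getD 0)   -- ts[-1]: the list is non-empty, so pyGet? is some
    if tails.isEmpty then
      latest_times.map (fun p => (p.1, ([] : List Int)))
    else
      let cutoff_ts := (PySem.List.max? tails (fun x => x)).getD 0 - hours * 3600
      sorted_lists.map (fun p => (p.1, p.2.drop (pvBisectLeft p.2 cutoff_ts 0 p.2.length)))   -- ts[i:] with 0 ≤ i = drop i

-- ===== PRECONDITION & SPEC =====
def Spec_filter_timestamps_by_hours (latest_times : List (String × List Int)) (hours : Int) (out : List (String × List Int)) : Prop := out = filter_timestamps_by_hours_alt latest_times hours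
instance (latest_times : List (String × List Int)) (hours : Int) (out : List (String × List Int)) : Decidable (Spec_filter_timestamps_by_hours latest_times hours out) := by unfold Spec_filter_timestamps_by_hours; infer_instance

-- ===== CLAIM (what is proved, stated in full; the proofs are below) =====
def Claim_equal_filter_timestamps_by_hours : Prop := ∀ (latest_times : List (String × List Int)) (hours : Int), Dom_filter_timestamps_by_hours latest_times hours → Spec_filter_timestamps_by_hours latest_times hours (filter_timestamps_by_hours latest_times hours)

-- ===== LEMMAS AND PROOFS =====

-- monotone access in a Pairwise-(≤) list
theorem pv_pairwise_le_getElem {s : List Int} (h : s.Pairwise (· ≤ ·)) {i j : Nat}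
    (hij : i ≤ j) (hj : j < s.length) : s[i]'(lt_of_le_of_lt hij hj) ≤ s[j] := by
  rcases Nat.lt_or_eq_of_le hij with h' | h'
  · exact (List.pairwise_iff_getElem.mp h) i j _ hj h'
  · subst h'; exact le_refl _

-- the binary search returns the split point: everything before is < x, everything from it on is ≥ x
theorem pvBisectLeft_spec (a : List Int) (x : Int) (ha : a.Pairwise (· ≤ ·)) :
    ∀ lo hi, lo ≤ hi → hi ≤ a.length →
    (∀ j (hj : j < a.length), j < lo → a[j] < x) →
    (∀ j (hj : j < a.length), hi ≤ j → x ≤ a[j]) →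
    pvBisectLeft a x lo hi ≤ a.length ∧
    (∀ j (hj : j < a.length), j < pvBisectLeft a x lo hi → a[j] < x) ∧
    (∀ j (hj : j < a.length), pvBisectLeft a x lo hi ≤ j → x ≤ a[j]) := by
  have main : ∀ n lo hi, hi - lo ≤ n → lo ≤ hi → hi ≤ a.length →
      (∀ j (hj : j < a.length), j < lo → a[j] < x) →
      (∀ j (hj : j < a.length), hi ≤ j → x ≤ a[j]) →
      pvBisectLoop a x n lo hi ≤ a.length ∧
      (∀ j (hj : j < a.length), j < pvBisectLoop a x n lo hi → a[j] < x) ∧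
      (∀ j (hj : j < a.length), pvBisectLoop a x n lo hi ≤ j → x ≤ a[j]) := by
    intro n
    induction n with
    | zero =>
      intro lo hi hn hlh hha hpre hpost
      have : lo = hi := by omega
      subst this
      exact ⟨hha, hpre, fun j hj hle => hpost j hj hle⟩
    | succ n ih =>
      intro lo hi hn hlh hha hpre hpost
      show _ ∧ _ ∧ _
      rw [pvBisectLoop]
      by_cases hlt : lo < hi
      · simp only [hlt, if_true]
        have hmid1 : lo ≤ (lo + hi) / 2 := by omega
        have hmid2 : (lo + hi) / 2 < hi := by omega
        have hmidlen : (lo + hi) / 2 < a.length := lt_of_lt_of_le hmid2 hha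
        have hget : a.getD ((lo + hi) / 2) 0 = a[(lo + hi) / 2] := by
          rw [List.getD_eq_getElem?_getD, List.getElem?_eq_getElem hmidlen]; rfl
        rw [hget]
        by_cases hc : a[(lo + hi) / 2] < x
        · simp only [hc, if_true]
          exact ih ((lo + hi) / 2 + 1) hi (by omega) (by omega) hha
            (fun j hj hjlt => lt_of_le_of_lt
              (pv_pairwise_le_getElem ha (by omega) hmidlen) hc)
            hpost
        · simp only [hc, if_false]
          have hxle : x ≤ a[(lo + hi) / 2] := le_of_not_gt hc
          exact ih lo ((lo + hi) / 2) (by omega) (by omega) (le_of_lt hmidlen) hpre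
            (fun j hj hjle => le_trans hxle (pv_pairwise_le_getElem ha hjle hj))
      · simp only [hlt, if_false]
        have : lo = hi := by omega
        subst this
        exact ⟨hha, hpre, fun j hj hle => hpost j hj hle⟩
  intro lo hi hlh hha hpre hpost
  exact main (hi - lo) lo hi le_rfl hlh hha hpre hpost

-- drop at the split point = filter by the cutoff, on a Pairwise-(≤) list
theorem pv_drop_bisect_eq_filter (s : List Int) (c : Int) (hs : s.Pairwise (· ≤ ·)) :
    s.drop (pvBisectLeft s c 0 s.length) = s.filter (fun ts => c ≤ ts) := by
  obtain ⟨hk, hpre, hpost⟩ := pvBisectLeft_spec s c hs 0 s.length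
    (Nat.zero_le _) le_rfl (by omega) (by intro j hj h; omega)
  set k := pvBisectLeft s c 0 s.length with hkdef
  conv_rhs => rw [← List.take_append_drop k s]
  rw [List.filter_append]
  have h1 : (s.take k).filter (fun ts => c ≤ ts) = [] := by
    rw [List.filter_eq_nil_iff]
    intro a hmem
    obtain ⟨i, hi, rfl⟩ := List.mem_iff_getElem.mp hmem
    rw [List.getElem_take]
    have hik : i < k := lt_of_lt_of_le hi (by simp)
    have : s[i] < c := hpre i (by rw [List.length_take] at hi; omega) hik
    simpa using not_le.mpr this
  have h2 : (s.drop k).filter (fun ts => c ≤ ts) = s.drop k := by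
    rw [List.filter_eq_self]
    intro a hmem
    obtain ⟨i, hi, rfl⟩ := List.mem_iff_getElem.mp hmem
    rw [List.getElem_drop]
    have hlen : k + i < s.length := by rw [List.length_drop] at hi; omega
    simpa using hpost (k + i) hlen (by omega)
  rw [h1, h2, List.nil_append]

-- sorting after filtering = filtering the sorted list
theorem pv_sorted_filter (l : List Int) (p : Int → Bool) :
    PySem.List.sorted (l.filter p) (fun x => x) false
      = (PySem.List.sorted l (fun x => x) false).filter p := by
  refine PySem.List.eq_of_perm_of_pairwise_le_of_injective (fun x => x) (fun _ _ h => h) ?_ ?_ ?_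
  · exact (PySem.List.sorted_perm _ _ _).trans ((PySem.List.sorted_perm l _ _).filter p).symm
  · exact PySem.List.sorted_pairwise _ _
  · exact (PySem.List.sorted_pairwise l _).filter p

-- per-list key lemma: A's "sort the filtered" equals B's "slice the sorted at the bisect point"
theorem pv_key (l : List Int) (c : Int) :
    PySem.List.sorted (l.filter (fun ts => c ≤ ts)) (fun x => x) false
      = (PySem.List.sorted l (fun x => x) false).drop
          (pvBisectLeft (PySem.List.sorted l (fun x => x) false) c 0
            (PySem.List.sorted l (fun x => x) false).length) := by
  rw [pv_sorted_filter, pv_drop_bisect_eq_filter _ _ (PySem.List.sorted_pairwise l (fun x => x))]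

-- ts[-1] of a non-empty list is its last element
theorem pv_pyGet_neg1 (s : List Int) (hs : s ≠ []) :
    (PySem.List.pyGet? s (-1)).getD 0 = s.getLast hs := by
  have h0 : 0 < s.length := List.length_pos_iff.mpr hs
  have h1 : s.length - 1 < s.length := by omega
  have h2 : (1:Nat) ≤ s.length := h0
  simp [PySem.List.pyGet?, PySem.List.pyIdx?, List.getLast_eq_getElem, h2,
    List.getElem?_eq_getElem h1]

-- the last element of a Pairwise-(≤) list bounds every element
theorem pv_getLast_max {s : List Int} (h : s.Pairwise (· ≤ ·)) (hs : s ≠ []) :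
    ∀ x ∈ s, x ≤ s.getLast hs := by
  intro x hx
  obtain ⟨i, hi, rfl⟩ := List.mem_iff_getElem.mp hx
  rw [List.getLast_eq_getElem]
  exact pv_pairwise_le_getElem h (by omega) (by omega)

-- tails are empty iff the flattened list is empty
theorem pv_tails_empty_iff (lt : List (String × List Int)) :
    (((lt.map (fun p => (p.1, PySem.List.sorted p.2 (fun x => x) false))).filter
        (fun p => !p.2.isEmpty)).map (fun p => (PySem.List.pyGet? p.2 (-1)).getD 0)) = []
      ↔ (lt.flatMap (fun p => p.2)) = [] := by
  simp only [List.map_eq_nil_iff, List.filter_eq_nil_iff, List.flatMap_eq_nil_iff,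
    List.mem_map, Bool.not_eq_true', List.isEmpty_eq_false_iff,
    forall_exists_index, and_imp, Prod.forall, Prod.mk.injEq, not_not]
  constructor
  · intro h a b hab
    have := h a (PySem.List.sorted b (fun x => x) false) a b hab rfl rfl
    exact (PySem.List.sorted_eq_nil_iff b (fun x => x) false).mp this
  · intro h a b x x1 hx hxa hsb
    subst hxa; subst hsb
    exact (PySem.List.sorted_eq_nil_iff x1 (fun x => x) false).mpr (h x x1 hx)

-- both maxima are the maximum of the same set of values
theorem pv_max_eq (lt : List (String × List Int))
    (hne : (lt.flatMap (fun p => p.2)) ≠ []) :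
    (PySem.List.max? (lt.flatMap (fun p => p.2)) (fun x => x)).getD 0
      = (PySem.List.max? (((lt.map (fun p => (p.1, PySem.List.sorted p.2 (fun x => x) false))).filter
          (fun p => !p.2.isEmpty)).map (fun p => (PySem.List.pyGet? p.2 (-1)).getD 0)) (fun x => x)).getD 0 := by
  set T := (((lt.map (fun p => (p.1, PySem.List.sorted p.2 (fun x => x) false))).filter
      (fun p => !p.2.isEmpty)).map (fun p => (PySem.List.pyGet? p.2 (-1)).getD 0)) with hT
  have hTne : T ≠ [] := fun h => hne ((pv_tails_empty_iff lt).mp (hT ▸ h))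
  obtain ⟨mF, hmF⟩ := Option.ne_none_iff_exists'.mp
    (show PySem.List.max? (lt.flatMap (fun p => p.2)) (fun x => x) ≠ none from
      fun h => hne ((PySem.List.max?_eq_none_iff _ _).mp h))
  obtain ⟨mT, hmT⟩ := Option.ne_none_iff_exists'.mp
    (show PySem.List.max? T (fun x => x) ≠ none from
      fun h => hTne ((PySem.List.max?_eq_none_iff _ _).mp h))
  rw [hmF, hmT]
  simp only [Option.getD_some]
  -- every element of T is an element of the flattened list
  have hTsub : ∀ t ∈ T, t ∈ lt.flatMap (fun p => p.2) := by
    intro t ht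
    rw [hT] at ht
    obtain ⟨q, hq, rfl⟩ := List.mem_map.mp ht
    obtain ⟨hqmem, hqne⟩ := List.mem_filter.mp hq
    obtain ⟨p, hp, rfl⟩ := List.mem_map.mp hqmem
    have hne2 : PySem.List.sorted p.2 (fun x => x) false ≠ [] := by
      simpa [List.isEmpty_iff] using hqne
    rw [pv_pyGet_neg1 _ hne2]
    exact List.mem_flatMap.mpr ⟨p, hp,
      (PySem.List.mem_sorted _ _ _ _).mp (List.getLast_mem hne2)⟩
  -- every element of the flattened list is bounded by some element of T
  have hFsub : ∀ y ∈ lt.flatMap (fun p => p.2), ∃ t ∈ T, y ≤ t := by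
    intro y hy
    obtain ⟨p, hp, hyp⟩ := List.mem_flatMap.mp hy
    have hsne : PySem.List.sorted p.2 (fun x => x) false ≠ [] := by
      rw [Ne, PySem.List.sorted_eq_nil_iff]
      intro h; rw [h] at hyp; exact absurd hyp (List.not_mem_nil)
    refine ⟨(PySem.List.sorted p.2 (fun x => x) false).getLast hsne, ?_, ?_⟩
    · rw [hT]
      refine List.mem_map.mpr ⟨(p.1, PySem.List.sorted p.2 (fun x => x) false), ?_, ?_⟩
      · exact List.mem_filter.mpr ⟨List.mem_map.mpr ⟨p, hp, rfl⟩,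
          by simpa [List.isEmpty_iff] using hsne⟩
      · exact pv_pyGet_neg1 _ hsne
    · exact pv_getLast_max (PySem.List.sorted_pairwise p.2 (fun x => x)) hsne y
        ((PySem.List.mem_sorted _ _ _ _).mpr hyp)
  apply le_antisymm
  · obtain ⟨t, htT, hle⟩ := hFsub mF (PySem.List.max?_mem hmF)
    exact le_trans hle (PySem.List.max?_isMax hmT t htT)
  · exact PySem.List.max?_isMax hmF _ (hTsub mT (PySem.List.max?_mem hmT))

-- ===== VERDICT (by name: the statement is the Claim_ definition above) =====
theorem filter_timestamps_by_hours_spec : Claim_equal_filter_timestamps_by_hours := by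
  intro lt hours _
  show filter_timestamps_by_hours lt hours = filter_timestamps_by_hours_alt lt hours
  unfold filter_timestamps_by_hours filter_timestamps_by_hours_alt
  by_cases hh : hours ≤ 0
  · simp [hh]
  · simp only [hh, if_false]
    by_cases hemp : (lt.flatMap (fun p => p.2)) = []
    · have ht : (((lt.map (fun p => (p.1, PySem.List.sorted p.2 (fun x => x) false))).filter
          (fun p => !p.2.isEmpty)).map (fun p => (PySem.List.pyGet? p.2 (-1)).getD 0)) = [] :=
        (pv_tails_empty_iff lt).mpr hemp
      simp [hemp, ht]
    · have ht : ¬ (((lt.map (fun p => (p.1, PySem.List.sorted p.2 (fun x => x) false))).filter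
          (fun p => !p.2.isEmpty)).map (fun p => (PySem.List.pyGet? p.2 (-1)).getD 0)) = [] :=
        fun h => hemp ((pv_tails_empty_iff lt).mp h)
      simp only [List.isEmpty_iff, hemp, ht, if_false, List.map_map]
      rw [← pv_max_eq lt hemp]
      apply List.map_congr_left
      intro p _
      simp only [Function.comp]
      exact congrArg (fun z => (p.1, z)) (pv_key p.2 _)
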